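-- pv_equiv track=rewrite | github.com/Vadrrrr/DevOps | sprint01/t02_return/shop.py | buy_bread
-- ===== SOURCE A (Python) =====
-- def buy_bread(money = None):
--     bread = '[bread]'
--     n = int(0)
--     if not money:
--         money = 0
--         return None
--     elif money < 19:
--         return None
--     elif money > 57:
--         return bread * 3
--     elif money == 19:
--         return bread
--     else:
--         for i in range(3):
--             money = money - 19
--             n = n + 1
--             if money - 19 == 0:
--                 return bread * (n + 1)
--             elif money < 19:
--                 return bread * n
-- ===== SOURCE B (Python) =====
-- def buy_bread(money = None):
--     if not money or money < 19:
--         return None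
--     count = int(money // 19)
--     if count > 3:
--         count = 3
--     return '[bread]' * count
-- ===== Notes on version B (the rewrite author's own statement) =====
-- stated objective: simpler
-- what changed: Replaced the branch ladder and trial-subtraction loop with a single guard plus closed-form floor division money//19 capped at 3.
import Mathlib
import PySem

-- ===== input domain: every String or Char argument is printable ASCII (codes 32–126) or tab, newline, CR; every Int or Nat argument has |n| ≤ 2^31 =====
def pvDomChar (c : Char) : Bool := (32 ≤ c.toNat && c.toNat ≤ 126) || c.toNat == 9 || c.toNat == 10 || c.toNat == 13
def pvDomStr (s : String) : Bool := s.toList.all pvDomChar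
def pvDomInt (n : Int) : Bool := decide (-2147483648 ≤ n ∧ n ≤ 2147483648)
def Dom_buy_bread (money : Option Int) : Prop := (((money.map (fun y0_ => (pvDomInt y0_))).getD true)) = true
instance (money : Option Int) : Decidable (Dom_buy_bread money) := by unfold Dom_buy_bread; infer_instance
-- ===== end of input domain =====

-- B replaces A's branch ladder and trial-subtraction loop with one guard plus floor division capped at 3 (simpler).


-- ===== PORT A =====
-- the 'for i in range(3)' loop: each iteration subtracts 19, bumps n, and may return; falling off the loop returns None
def pvLoopA (money n : Int) (iters : Nat) (bread : String) : Option String :=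
  match iters with
  | 0 => none
  | iters' + 1 =>
    let money := money - 19
    let n := n + 1
    if money - 19 = 0 then some (String.join (List.replicate (n + 1).toNat bread))
    else if money < 19 then some (String.join (List.replicate n.toNat bread))
    else pvLoopA money n iters' bread

def buy_bread (money : Option Int) : Option String :=
  let bread := "[bread]"
  let n : Int := 0
  match money with
  | none => none                        -- 'not money' true for None
  | some m =>
    if m = 0 then none                  -- 'not money' true for 0
    else if m < 19 then none
    else if m > 57 then some (String.join (List.replicate 3 bread))
    else if m = 19 then some bread
    else pvLoopA m n 3 bread

-- ===== PORT B =====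
def buy_bread_alt (money : Option Int) : Option String :=
  match money with
  | none => none
  | some m =>
    if m = 0 ∨ m < 19 then none
    else
      let count := PySem.Int.floordiv m 19
      let count := if count > 3 then 3 else count
      some (String.join (List.replicate count.toNat "[bread]"))

-- ===== PRECONDITION & SPEC =====
def Spec_buy_bread (money : Option Int) (out : Option String) : Prop := out = buy_bread_alt money
instance (money : Option Int) (out : Option String) : Decidable (Spec_buy_bread money out) := by unfold Spec_buy_bread; infer_instance

-- ===== CLAIM (what is proved, stated in full; the proofs are below) =====
def Claim_equal_buy_bread : Prop := ∀ (money : Option Int), Dom_buy_bread money → Spec_buy_bread money (buy_bread money)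

-- ===== LEMMAS AND PROOFS =====
theorem fd19 (m : Int) : PySem.Int.floordiv m 19 = m / 19 :=
  PySem.Int.floordiv_eq_ediv_of_pos (by norm_num)

-- ===== VERDICT (by name: the statement is the Claim_ definition above) =====
theorem buy_bread_spec : Claim_equal_buy_bread := by
  intro money _
  unfold Spec_buy_bread buy_bread buy_bread_alt
  match money with
  | none => rfl
  | some m =>
    simp only [fd19]
    by_cases h0 : m = 0
    · simp [h0]
    by_cases h1 : m < 19
    · simp [h0, h1]
    have h19 : ¬ (m = 0 ∨ m < 19) := by omega
    simp only [h0, h1, if_false]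
    by_cases h2 : m > 57
    · by_cases hg : m / 19 > 3
      · simp [h2, hg]
      · have : m / 19 = 3 := by omega
        simp [h2, this]
    by_cases h3 : m = 19
    · subst h3; norm_num [String.join, List.replicate]
    -- 20 ≤ m ≤ 57, m ≠ 19 : unfold the loop
    have hq : ¬ (m / 19 > 3) := by omega
    simp only [if_neg h2, if_neg h3, hq, if_false]
    unfold pvLoopA
    by_cases c1 : m - 19 - 19 = 0
    · have : m / 19 = 2 := by omega
      simp [c1, this]
    by_cases c2 : m - 19 < 19
    · have : m / 19 = 1 := by omega
      simp [c1, c2, this]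
    unfold pvLoopA
    by_cases c3 : m - 19 - 19 - 19 = 0
    · have : m / 19 = 3 := by omega
      simp [c1, c2, c3, this]
    · have c4 : m - 19 - 19 < 19 := by omega
      have : m / 19 = 2 := by omega
      simp [c1, c2, c3, c4, this]
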